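-- pv_equiv track=rewrite | github.com/simmonsnick/Truck-Agent-Planning | compute_actions.py | truck_plan_path
-- ===== SOURCE A (Python) =====
-- def truck_plan_path(plan_lines):
--     path = []
--     for line in plan_lines:
--         line_lower = line.lower()
--         if "drive" in line_lower and "truck" in line_lower:
--             parts = line.strip("()\n").split()
--             if len(parts) >= 4:
--                 from_loc = parts[2].upper()
--                 to_loc = parts[3].upper()
--                 if not path:
--                     path.append(from_loc)
--                 path.append(to_loc)
--     return path
-- ===== SOURCE B (Python) =====
-- def truck_plan_path(plan_lines):
--     # Right-to-left traversal building the path back-to-front: prepend each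
--     # destination, and remember the origin of the most recently seen (i.e.
--     # earliest) drive edge; prepend it once at the end.
--     tos = []
--     first_from = None
--     for line in reversed(plan_lines):
--         line_lower = line.lower()
--         if "drive" in line_lower and "truck" in line_lower:
--             parts = line.strip("()\n").split()
--             if len(parts) >= 4:
--                 tos = [parts[3].upper()] + tos
--                 first_from = parts[2].upper()
--     if first_from is None:
--         return []
--     return [first_from] + tos
-- ===== Notes on version B (the rewrite author's own statement) =====
-- stated objective: alternative
-- what changed: Traverses the plan right-to-left, building the path back-to-front by prepending each destination and carrying the origin of the earliest drive edge in a separate state variable, instead of A's forward append-loop with its 'if not path' first-element special case.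
import Mathlib
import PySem

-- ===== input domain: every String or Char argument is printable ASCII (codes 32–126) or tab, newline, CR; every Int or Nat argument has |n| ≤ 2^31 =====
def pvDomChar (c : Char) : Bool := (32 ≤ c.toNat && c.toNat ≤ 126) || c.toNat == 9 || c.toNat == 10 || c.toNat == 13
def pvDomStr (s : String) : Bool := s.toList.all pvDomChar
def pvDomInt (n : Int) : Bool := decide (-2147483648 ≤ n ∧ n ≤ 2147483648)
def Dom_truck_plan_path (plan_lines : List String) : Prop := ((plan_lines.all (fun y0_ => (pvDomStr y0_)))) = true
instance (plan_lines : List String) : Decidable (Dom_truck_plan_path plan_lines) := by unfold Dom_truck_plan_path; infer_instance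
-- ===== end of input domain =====

-- B traverses the plan right-to-left, building the path back-to-front and carrying the
-- earliest edge's origin separately; objective: alternative decomposition, same cost.

-- ===== PORT A =====
-- A's loop body: path is the accumulator, one line processed per step.
def pvDriveStep (path : List String) (line : String) : List String :=
  let line_lower := PySem.Str.lower line
  if PySem.Str.isIn "drive" line_lower && PySem.Str.isIn "truck" line_lower then
    let parts := PySem.Str.split₀ (PySem.Str.stripChars line "()\n")
    if 4 ≤ parts.length then
      let from_loc := PySem.Str.upper ((PySem.List.pyGet? parts 2).getD "")  -- index guarded by len ≥ 4
      let to_loc := PySem.Str.upper ((PySem.List.pyGet? parts 3).getD "")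
      (if path = [] then path ++ [from_loc] else path) ++ [to_loc]
    else path
  else path

def truck_plan_path (plan_lines : List String) : List String :=
  plan_lines.foldl pvDriveStep []

-- ===== PORT B =====
-- B's loop body over reversed(plan_lines): state is (tos, first_from).
def pvRevStep (st : List String × Option String) (line : String) : List String × Option String :=
  let line_lower := PySem.Str.lower line
  if PySem.Str.isIn "drive" line_lower && PySem.Str.isIn "truck" line_lower then
    let parts := PySem.Str.split₀ (PySem.Str.stripChars line "()\n")
    if 4 ≤ parts.length then
      (PySem.Str.upper ((PySem.List.pyGet? parts 3).getD "") :: st.1,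
       some (PySem.Str.upper ((PySem.List.pyGet? parts 2).getD "")))
    else st
  else st

def truck_plan_path_alt (plan_lines : List String) : List String :=
  let st := plan_lines.reverse.foldl pvRevStep ([], none)
  match st.2 with
  | none => []
  | some f => f :: st.1

-- ===== PRECONDITION & SPEC =====
def Spec_truck_plan_path (plan_lines : List String) (out : List String) : Prop := out = truck_plan_path_alt plan_lines
instance (plan_lines : List String) (out : List String) : Decidable (Spec_truck_plan_path plan_lines out) := by unfold Spec_truck_plan_path; infer_instance

-- ===== CLAIM (what is proved, stated in full; the proofs are below) =====
def Claim_equal_truck_plan_path : Prop := ∀ (plan_lines : List String), Dom_truck_plan_path plan_lines → Spec_truck_plan_path plan_lines (truck_plan_path plan_lines)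

-- ===== LEMMAS AND PROOFS =====

-- Proof-side edge extractor: the (from, to) pair a drive line contributes, if any.
def pvEdge? (line : String) : Option (String × String) :=
  let line_lower := PySem.Str.lower line
  if PySem.Str.isIn "drive" line_lower && PySem.Str.isIn "truck" line_lower then
    let parts := PySem.Str.split₀ (PySem.Str.stripChars line "()\n")
    if 4 ≤ parts.length then
      some (PySem.Str.upper ((PySem.List.pyGet? parts 2).getD ""),
            PySem.Str.upper ((PySem.List.pyGet? parts 3).getD ""))
    else none
  else none

theorem pvDriveStep_eq (path : List String) (line : String) :
    pvDriveStep path line =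
      match pvEdge? line with
      | none => path
      | some e => (if path = [] then [e.1] else path) ++ [e.2] := by
  unfold pvDriveStep pvEdge?
  dsimp only
  split_ifs <;> first
    | rfl
    | (rename_i hp; subst hp; rfl)

theorem pvRevStep_eq (st : List String × Option String) (line : String) :
    pvRevStep st line =
      match pvEdge? line with
      | none => st
      | some e => (e.2 :: st.1, some e.1) := by
  unfold pvRevStep pvEdge?
  dsimp only
  split_ifs <;> rfl

-- A: once the path is nonempty, the loop only appends the to-locations.
theorem foldl_step_ne_nil (rest : List String) (path : List String) (h : path ≠ []) :
    rest.foldl pvDriveStep path = path ++ (rest.filterMap pvEdge?).map Prod.snd := by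
  induction rest generalizing path with
  | nil => simp
  | cons line tail ih =>
    cases hE : pvEdge? line with
    | none =>
      simp only [List.foldl_cons, List.filterMap_cons, pvDriveStep_eq, hE]
      exact ih path h
    | some e =>
      simp only [List.foldl_cons, List.filterMap_cons, pvDriveStep_eq, hE, if_neg h]
      rw [ih (path ++ [e.2]) (by simp)]
      simp

-- A equals the canonical form: first origin, then all destinations.
theorem foldl_step_nil (lines : List String) :
    lines.foldl pvDriveStep [] =
      match lines.filterMap pvEdge? with
      | [] => []
      | e :: _ => e.1 :: (lines.filterMap pvEdge?).map Prod.snd := by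
  induction lines with
  | nil => rfl
  | cons line tail ih =>
    cases hE : pvEdge? line with
    | none =>
      simp only [List.foldl_cons, pvDriveStep_eq, hE, List.filterMap_cons]
      exact ih
    | some e =>
      simp only [List.foldl_cons, pvDriveStep_eq, hE, List.filterMap_cons, if_true]
      rw [foldl_step_ne_nil tail ([e.1] ++ [e.2]) (by simp)]
      simp

-- B's right fold: the reversed-foldl is a foldr, whose state is all destinations
-- plus the earliest edge's origin.
theorem foldr_rev_state (lines : List String) :
    lines.foldr (fun line st => pvRevStep st line) ([], none) =
      ((lines.filterMap pvEdge?).map Prod.snd,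
       (lines.filterMap pvEdge?).head?.map Prod.fst) := by
  induction lines with
  | nil => rfl
  | cons line tail ih =>
    rw [List.foldr_cons, pvRevStep_eq, ih, List.filterMap_cons]
    cases hE : pvEdge? line <;> simp

-- ===== VERDICT (by name: the statement is the Claim_ definition above) =====
theorem truck_plan_path_spec : Claim_equal_truck_plan_path := by
  intro plan_lines _
  unfold Spec_truck_plan_path truck_plan_path truck_plan_path_alt
  rw [List.foldl_reverse, foldr_rev_state, foldl_step_nil]
  cases h : plan_lines.filterMap pvEdge? <;> simp
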